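-- pv_equiv track=rewrite | github.com/Seven-of-Di/ben | src/utils.py | compare_two_list
-- ===== SOURCE A (Python) =====
-- from typing import Dict, Iterable, List, Optional
--
-- def compare_two_list(list_1: List[int], List_2: List[int]):
--     list_1_sup = True
--     list_2_sup = True
--     for val_1, val_2 in zip(list_1, List_2):
--         if val_1 < val_2:
--             list_1_sup = False
--             break
--     for val_1, val_2 in zip(list_1, List_2):
--         if val_2 < val_1:
--             list_2_sup = False
--             break
--     if (not list_1_sup and not list_2_sup) or (list_1_sup and list_2_sup):
--         return None
--     if list_1_sup:
--         return True
--     if list_2_sup: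
--         return False
-- ===== SOURCE B (Python) =====
-- def compare_two_list(list_1, List_2):
--     list_1_sup = True
--     list_2_sup = True
--     for val_1, val_2 in zip(list_1, List_2):
--         if val_1 < val_2:
--             list_1_sup = False
--         if val_2 < val_1:
--             list_2_sup = False
--         if not list_1_sup and not list_2_sup:
--             break
--     if list_1_sup == list_2_sup:
--         return None
--     return list_1_sup
-- ===== Notes on version B (the rewrite author's own statement) =====
-- stated objective: simpler
-- what changed: Replaces A's two separate break-on-first-violation scans of zip(list_1, List_2) with a single combined pass that maintains both dominance flags together and stops once both are false, then returns None when the flags agree and the first flag otherwise.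
import Mathlib
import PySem

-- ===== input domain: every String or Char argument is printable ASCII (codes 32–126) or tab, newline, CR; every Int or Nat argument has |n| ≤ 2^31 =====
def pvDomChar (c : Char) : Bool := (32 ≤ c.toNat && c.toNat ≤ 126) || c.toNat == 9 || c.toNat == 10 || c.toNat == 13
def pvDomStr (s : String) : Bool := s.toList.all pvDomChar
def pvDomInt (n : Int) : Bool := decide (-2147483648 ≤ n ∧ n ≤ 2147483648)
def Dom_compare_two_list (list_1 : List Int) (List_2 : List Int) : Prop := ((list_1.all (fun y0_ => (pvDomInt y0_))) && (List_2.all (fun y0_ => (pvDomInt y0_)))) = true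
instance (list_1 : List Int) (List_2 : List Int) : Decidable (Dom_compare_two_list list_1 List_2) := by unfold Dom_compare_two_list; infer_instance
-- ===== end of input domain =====

-- B merges A's two sequential break-on-violation scans into one combined pass maintaining both flags (simpler, same return value).


-- ===== PORT A =====
-- first loop: break (returning false) at the first pair with val_1 < val_2
def aScan1 : List (Int × Int) → Bool
  | [] => true
  | (a, b) :: t => if a < b then false else aScan1 t

-- second loop: break (returning false) at the first pair with val_2 < val_1
def aScan2 : List (Int × Int) → Bool
  | [] => true
  | (a, b) :: t => if b < a then false else aScan2 t

def compare_two_list (list_1 : List Int) (List_2 : List Int) : Option Bool :=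
  let list_1_sup := aScan1 (list_1.zip List_2)
  let list_2_sup := aScan2 (list_1.zip List_2)
  if (!list_1_sup && !list_2_sup) || (list_1_sup && list_2_sup) then none
  else if list_1_sup then some true
  else if list_2_sup then some false
  else none  -- Python falls off the function end → None (unreachable here)

-- ===== PORT B =====
-- single combined pass over the zipped pairs, carrying both flags; break once both are false
def bGo : List (Int × Int) → Bool → Bool → Bool × Bool
  | [], s1, s2 => (s1, s2)
  | (a, b) :: t, s1, s2 =>
    let s1' := if a < b then false else s1
    let s2' := if b < a then false else s2
    if !s1' && !s2' then (s1', s2') else bGo t s1' s2'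

def compare_two_list_alt (list_1 : List Int) (List_2 : List Int) : Option Bool :=
  let p := bGo (list_1.zip List_2) true true
  if p.1 == p.2 then none else some p.1

-- ===== PRECONDITION & SPEC =====
def Spec_compare_two_list (list_1 : List Int) (List_2 : List Int) (out : Option Bool) : Prop := out = compare_two_list_alt list_1 List_2
instance (list_1 : List Int) (List_2 : List Int) (out : Option Bool) : Decidable (Spec_compare_two_list list_1 List_2 out) := by unfold Spec_compare_two_list; infer_instance

-- ===== CLAIM (what is proved, stated in full; the proofs are below) =====
def Claim_equal_compare_two_list : Prop := ∀ (list_1 : List Int) (List_2 : List Int), Dom_compare_two_list list_1 List_2 → Spec_compare_two_list list_1 List_2 (compare_two_list list_1 List_2)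

-- ===== LEMMAS AND PROOFS =====
-- the combined pass computes exactly the two separate-scan flags (early stop is sound: false stays false)
theorem bGo_eq (ps : List (Int × Int)) (s1 s2 : Bool) :
    bGo ps s1 s2 = (s1 && aScan1 ps, s2 && aScan2 ps) := by
  induction ps generalizing s1 s2 with
  | nil => simp [bGo, aScan1, aScan2]
  | cons hd t ih =>
    obtain ⟨a, b⟩ := hd
    simp only [bGo, aScan1, aScan2]
    by_cases h1 : a < b
    · have h2 : ¬ b < a := by omega
      cases s2 <;> simp [h1, h2, ih]
    · by_cases h2 : b < a
      · cases s1 <;> simp [h1, h2, ih]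
      · cases s1 <;> cases s2 <;> simp [h1, h2, ih]

-- ===== VERDICT (by name: the statement is the Claim_ definition above) =====
theorem compare_two_list_spec : Claim_equal_compare_two_list := by
  intro l1 l2 _
  unfold Spec_compare_two_list compare_two_list compare_two_list_alt
  rw [bGo_eq]
  cases h1 : aScan1 (l1.zip l2) <;> cases h2 : aScan2 (l1.zip l2) <;> simp
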